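-- pv_equiv track=rewrite | github.com/Darrionat/CapEquivalenceClasses | generate_functions.py | check_gamma
-- ===== SOURCE A (Python) =====
-- def gamma(permutation, n, a, b):
--     if a == 0:
--         return 0
--     for x in range(2 ** n):
--         # F(x+a)
--         f_xa = permutation[x ^ a]
--         # F(x)
--         f_x = permutation[x]
--         if f_xa ^ f_x == b:
--             # has solution
--             return True
--     return False
--
-- def check_gamma(permutation, n):
--     # 2^{n-1}
--     sum = 0
--     for x in range(1, 2 ** n):
--         sum += gamma(permutation, n, x, x)
--     val = int(2 ** (n - 1))
--     if n % 2 == 1: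
--         return sum == val, sum
--     return sum == val - 1, sum
-- ===== SOURCE B (Python) =====
-- def check_gamma(permutation, n):
--     # Bucket indices by the invariant x ^ permutation[x]: a difference a has a
--     # solution of F(x^a)^F(x)=a exactly when two distinct indices share a bucket
--     # and xor to a, so the inner scan over x disappears into a hash index.
--     size = 2 ** n
--     buckets = {}
--     for x in range(size):
--         k = x ^ permutation[x]
--         buckets[k] = buckets.get(k, []) + [x]
--     found = set()
--     for idxs in buckets.values():
--         for x in idxs:
--             for y in idxs:
--                 if x != y:
--                     found.add(x ^ y)
--     sum = len(found)
--     val = int(2 ** (n - 1))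
--     if n % 2 == 1:
--         return sum == val, sum
--     return sum == val - 1, sum
-- ===== Notes on version B (the rewrite author's own statement) =====
-- stated objective: alternative
-- what changed: Replaces the per-difference exhaustive scan (gamma helper re-scanning all x for each a) by a hash index: indices are bucketed once by the invariant x ^ permutation[x], and a has a solution exactly when two distinct indices in one bucket xor to a, so found differences are collected per bucket pair.
-- outside the precondition, e.g. on check_gamma([], 0): A returns (False, 0), B raises IndexError
import Mathlib
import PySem

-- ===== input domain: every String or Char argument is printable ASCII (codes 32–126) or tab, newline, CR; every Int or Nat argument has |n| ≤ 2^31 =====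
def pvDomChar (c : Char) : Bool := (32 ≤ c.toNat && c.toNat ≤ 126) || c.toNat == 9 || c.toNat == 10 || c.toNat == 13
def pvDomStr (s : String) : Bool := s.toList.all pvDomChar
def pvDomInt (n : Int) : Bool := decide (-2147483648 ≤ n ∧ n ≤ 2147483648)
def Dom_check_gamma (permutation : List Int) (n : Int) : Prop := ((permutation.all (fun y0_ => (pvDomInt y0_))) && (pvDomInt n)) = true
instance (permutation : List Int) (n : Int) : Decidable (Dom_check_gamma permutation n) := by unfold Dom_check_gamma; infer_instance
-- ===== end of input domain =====

-- B replaces the per-difference scan by a hash index bucketing indices by x ^ permutation[x];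
-- a difference has a solution iff two distinct indices in one bucket xor to it (alternative algorithm).

-- ===== PORT A =====
-- gamma's 'for x in range(2**n): … return True … return False'; Python's 0/True/False,
-- consumed only arithmetically by check_gamma, is modelled as the Int 0/1.
def gammaLoop (permutation : List Int) (a b : Int) : List Int → Int
  | [] => 0
  | x :: rest =>
    let f_xa := PySem.List.pyGetD permutation (PySem.Int.bxor x a) 0
    let f_x := PySem.List.pyGetD permutation x 0
    if PySem.Int.bxor f_xa f_x = b then 1 else gammaLoop permutation a b rest

-- 2**n is ported as (2:Int)^n.toNat; for n < 0 Python's 2**n is a float and range raises (outside Pre_).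
def gamma (permutation : List Int) (n a b : Int) : Int :=
  if a = 0 then 0
  else gammaLoop permutation a b (PySem.List.pyRange 0 ((2:Int) ^ n.toNat) 1)

def check_gamma (permutation : List Int) (n : Int) : Bool × Int :=
  let sum : Int :=
    (PySem.List.pyRange 1 ((2:Int) ^ n.toNat) 1).foldl
      (fun s x => s + gamma permutation n x x) 0
  -- val = int(2**(n-1)): 2^(n-1) for n ≥ 1, int(0.5) = 0 for n = 0 (n < 0 is outside Pre_)
  let val : Int := if 1 ≤ n then (2:Int) ^ (n - 1).toNat else 0
  if PySem.Int.mod n 2 = 1 then (decide (sum = val), sum)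
  else (decide (sum = val - 1), sum)

-- ===== PORT B =====
def check_gamma_alt (permutation : List Int) (n : Int) : Bool × Int :=
  let size : Int := (2:Int) ^ n.toNat
  -- buckets[k] = buckets.get(k, []) + [x]  with k = x ^ permutation[x]
  let buckets : PySem.Dict Int (List Int) :=
    (PySem.List.pyRange 0 size 1).foldl
      (fun d x => d.modify (PySem.Int.bxor x (PySem.List.pyGetD permutation x 0)) [] (· ++ [x]))
      PySem.Dict.empty
  let found : PySem.Set Int :=
    buckets.values.foldl
      (fun s idxs =>
        idxs.foldl
          (fun s x =>
            idxs.foldl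
              (fun s y => if x ≠ y then PySem.Set.add s (PySem.Int.bxor x y) else s) s) s)
      PySem.Set.empty
  let sum : Int := PySem.Set.len found
  let val : Int := if 1 ≤ n then (2:Int) ^ (n - 1).toNat else 0
  if PySem.Int.mod n 2 = 1 then (decide (sum = val), sum)
  else (decide (sum = val - 1), sum)

-- ===== PRECONDITION & SPEC =====
-- Pre_: n ≥ 0 (a negative n makes 2**n a float and range() raises TypeError) and the list covers
-- all indices 0..2^n-1 (for n ≥ 1 A itself raises IndexError on a shorter list). This also requires
-- a nonempty list when n = 0: there A returns (False, 0) without ever indexing, while B's bucket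
-- pass must read permutation[0] and raises IndexError — that corner is excluded, see claim cites.
def Pre_check_gamma (permutation : List Int) (n : Int) : Prop :=
  0 ≤ n ∧ (2:Int) ^ n.toNat ≤ permutation.length
instance (permutation : List Int) (n : Int) : Decidable (Pre_check_gamma permutation n) := by
  unfold Pre_check_gamma; infer_instance
def pvWitness_check_gamma : List Int × Int := ([0, 1, 2, 3], 2)

def Spec_check_gamma (permutation : List Int) (n : Int) (out : Bool × Int) : Prop := out = check_gamma_alt permutation n
instance (permutation : List Int) (n : Int) (out : Bool × Int) : Decidable (Spec_check_gamma permutation n out) := by unfold Spec_check_gamma; infer_instance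

-- ===== CLAIM (what is proved, stated in full; the proofs are below) =====
def Claim_equal_check_gamma : Prop := ∀ (permutation : List Int) (n : Int), Dom_check_gamma permutation n → Pre_check_gamma permutation n → Spec_check_gamma permutation n (check_gamma permutation n)

-- ===== LEMMAS AND PROOFS =====

-- xor algebra for PySem.Int.bxor (associativity is not in the prelude)
theorem bxor_not_left (a b : Int) :
    PySem.Int.bxor (-a - 1) b = -(PySem.Int.bxor a b) - 1 := by
  simp only [PySem.Int.bxor]
  have e : -(-a - 1) - 1 = a := by ring
  rw [e]
  split_ifs <;> omega

theorem bxor_not_right (a b : Int) :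
    PySem.Int.bxor a (-b - 1) = -(PySem.Int.bxor a b) - 1 := by
  simp only [PySem.Int.bxor]
  have e : -(-b - 1) - 1 = b := by ring
  rw [e]
  split_ifs <;> omega

theorem bxor_assoc (a b c : Int) :
    PySem.Int.bxor (PySem.Int.bxor a b) c = PySem.Int.bxor a (PySem.Int.bxor b c) := by
  have rep : ∀ x : Int, (∃ m : Nat, x = (m : Int)) ∨ ∃ m : Nat, x = -(m : Int) - 1 := by
    intro x
    rcases le_or_gt 0 x with h | h
    · exact Or.inl ⟨x.toNat, by omega⟩
    · exact Or.inr ⟨(-x - 1).toNat, by omega⟩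
  rcases rep a with ⟨ma, rfl⟩ | ⟨ma, rfl⟩ <;>
    rcases rep b with ⟨mb, rfl⟩ | ⟨mb, rfl⟩ <;>
      rcases rep c with ⟨mc, rfl⟩ | ⟨mc, rfl⟩ <;>
    simp only [bxor_not_left, bxor_not_right, PySem.Int.bxor_natCast] <;>
    rw [Nat.xor_assoc]

theorem zero_bxor (a : Int) : PySem.Int.bxor 0 a = a := by
  rw [PySem.Int.bxor_comm, PySem.Int.bxor_zero]

theorem bxor_left_comm (a b c : Int) :
    PySem.Int.bxor a (PySem.Int.bxor b c) = PySem.Int.bxor b (PySem.Int.bxor a c) := by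
  rw [← bxor_assoc, ← bxor_assoc, PySem.Int.bxor_comm a b]

theorem bxor_cancel_left (a b : Int) : PySem.Int.bxor a (PySem.Int.bxor a b) = b := by
  rw [← bxor_assoc, PySem.Int.bxor_self, zero_bxor]

-- the bucket key
def cgKey (permutation : List Int) (x : Int) : Int :=
  PySem.Int.bxor x (PySem.List.pyGetD permutation x 0)

-- A's per-a condition and B's bucket-pair condition
abbrev condA (permutation : List Int) (n a : Int) : Prop :=
  ∃ x ∈ PySem.List.pyRange 0 ((2:Int) ^ n.toNat) 1,
    PySem.Int.bxor (PySem.List.pyGetD permutation (PySem.Int.bxor x a) 0)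
                   (PySem.List.pyGetD permutation x 0) = a

abbrev condB (permutation : List Int) (n a : Int) : Prop :=
  ∃ x ∈ PySem.List.pyRange 0 ((2:Int) ^ n.toNat) 1,
    ∃ y ∈ PySem.List.pyRange 0 ((2:Int) ^ n.toNat) 1,
      x ≠ y ∧ cgKey permutation x = cgKey permutation y ∧ PySem.Int.bxor x y = a

-- A's early-return scan returns 1 exactly when some x in the range satisfies the condition.
theorem gammaLoop_eq_exists (permutation : List Int) (a b : Int) (l : List Int) :
    gammaLoop permutation a b l =
      (if (∃ x ∈ l,
          PySem.Int.bxor (PySem.List.pyGetD permutation (PySem.Int.bxor x a) 0)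
                         (PySem.List.pyGetD permutation x 0) = b)
       then 1 else 0) := by
  induction l with
  | nil => simp [gammaLoop]
  | cons x rest ih =>
    by_cases h : PySem.Int.bxor (PySem.List.pyGetD permutation (PySem.Int.bxor x a) 0)
        (PySem.List.pyGetD permutation x 0) = b
    · simp [gammaLoop, h]
    · simp [gammaLoop, h, ih]

-- generic membership/nodup transport through a fold with a set accumulator
theorem cg_mem_foldl {β : Type} (step : PySem.Set Int → β → PySem.Set Int) (Q : β → Prop)
    (a : Int) (h : ∀ s x, a ∈ step s x ↔ a ∈ s ∨ Q x) :
    ∀ (l : List β) (s : PySem.Set Int), a ∈ l.foldl step s ↔ a ∈ s ∨ ∃ x ∈ l, Q x := by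
  intro l
  induction l with
  | nil => intro s; simp
  | cons x rest ih =>
    intro s
    simp only [List.foldl_cons, ih, h, List.mem_cons]
    constructor
    · rintro ((hs | hq) | ⟨y, hy, hQ⟩)
      · exact Or.inl hs
      · exact Or.inr ⟨x, Or.inl rfl, hq⟩
      · exact Or.inr ⟨y, Or.inr hy, hQ⟩
    · rintro (hs | ⟨y, (rfl | hy), hQ⟩)
      · exact Or.inl (Or.inl hs)
      · exact Or.inl (Or.inr hQ)
      · exact Or.inr ⟨y, hy, hQ⟩

theorem cg_nodup_foldl {β : Type} (step : PySem.Set Int → β → PySem.Set Int)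
    (h : ∀ s x, s.Nodup → (step s x).Nodup) :
    ∀ (l : List β) (s : PySem.Set Int), s.Nodup → (l.foldl step s).Nodup := by
  intro l
  induction l with
  | nil => intro s hs; exact hs
  | cons x rest ih => intro s hs; exact ih _ (h s x hs)

-- B's buckets: the value stored at key c is the in-order list of indices with that key
theorem cg_buckets_getD (permutation : List Int) (X : List Int) (c : Int) :
    ((X.foldl
        (fun d x => d.modify (cgKey permutation x) [] (· ++ [x]))
        (PySem.Dict.empty : PySem.Dict Int (List Int))).getD c []) =
      X.filter (fun x => cgKey permutation x == c) := by
  have h1 : (X.foldl (fun d x => d.modify (cgKey permutation x) [] (· ++ [x]))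
      (PySem.Dict.empty : PySem.Dict Int (List Int))) =
      ((X.map (fun x => (cgKey permutation x, x))).foldl
        (fun d p => d.modify p.1 [] (· ++ [p.2])) PySem.Dict.empty) := by
    rw [List.foldl_map]
  rw [h1, PySem.Dict.getD_foldl_modify_append, PySem.Dict.getD_empty]
  simp [List.filter_map, Function.comp_def, List.map_map]

theorem cg_buckets_keys_nodup (permutation : List Int) (X : List Int) :
    ((X.foldl
        (fun d x => d.modify (cgKey permutation x) [] (· ++ [x]))
        (PySem.Dict.empty : PySem.Dict Int (List Int))).keys).Nodup :=
  PySem.Dict.nodup_keys_foldl_modify_key X (cgKey permutation) [] (fun _ x => (· ++ [x]))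
    PySem.Dict.empty (by simp)

theorem cg_buckets_keys (permutation : List Int) (X : List Int) :
    ((X.foldl
        (fun d x => d.modify (cgKey permutation x) [] (· ++ [x]))
        (PySem.Dict.empty : PySem.Dict Int (List Int))).keys) =
      PySem.Set.ofList (X.map (cgKey permutation)) := by
  rw [PySem.Dict.keys_foldl_modify_key]
  simp [PySem.Set.update, PySem.Set.ofList, PySem.Dict.keys_empty]

-- membership in B's found-set is exactly condB
theorem cg_mem_found (permutation : List Int) (n a : Int) :
    (a ∈ (((PySem.List.pyRange 0 ((2:Int) ^ n.toNat) 1).foldl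
        (fun d x => d.modify (cgKey permutation x) [] (· ++ [x]))
        (PySem.Dict.empty : PySem.Dict Int (List Int))).values).foldl
      (fun s idxs =>
        idxs.foldl
          (fun s x =>
            idxs.foldl
              (fun s y => if x ≠ y then PySem.Set.add s (PySem.Int.bxor x y) else s) s) s)
      PySem.Set.empty) ↔ condB permutation n a := by
  set X := PySem.List.pyRange 0 ((2:Int) ^ n.toNat) 1 with hX
  set bk := (X.foldl (fun d x => d.modify (cgKey permutation x) [] (· ++ [x]))
      (PySem.Dict.empty : PySem.Dict Int (List Int))) with hbk
  have hinner : ∀ (x : Int) (s : PySem.Set Int) (idxs : List Int),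
      a ∈ idxs.foldl
          (fun s y => if x ≠ y then PySem.Set.add s (PySem.Int.bxor x y) else s) s ↔
        a ∈ s ∨ ∃ y ∈ idxs, x ≠ y ∧ PySem.Int.bxor x y = a := by
    intro x s idxs
    rw [cg_mem_foldl _ (fun y => x ≠ y ∧ PySem.Int.bxor x y = a)]
    intro s y
    by_cases h : x = y
    · simp [h]
    · simp [h, PySem.Set.mem_add, eq_comm]
  have hmid : ∀ (s : PySem.Set Int) (idxs : List Int),
      a ∈ idxs.foldl
          (fun s x => idxs.foldl
            (fun s y => if x ≠ y then PySem.Set.add s (PySem.Int.bxor x y) else s) s) s ↔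
        a ∈ s ∨ ∃ x ∈ idxs, ∃ y ∈ idxs, x ≠ y ∧ PySem.Int.bxor x y = a := by
    intro s idxs
    exact cg_mem_foldl _ (fun x => ∃ y ∈ idxs, x ≠ y ∧ PySem.Int.bxor x y = a) a
      (fun s x => hinner x s idxs) idxs s
  rw [cg_mem_foldl _
      (fun idxs => ∃ x ∈ idxs, ∃ y ∈ idxs, x ≠ y ∧ PySem.Int.bxor x y = a) a
      (fun s idxs => hmid s idxs)]
  have hvals : bk.values = bk.keys.map (fun k => bk.getD k []) :=
    PySem.Dict.values_eq_map_keys bk (cg_buckets_keys_nodup permutation X) []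
  simp only [PySem.Set.empty, List.not_mem_nil, false_or]
  rw [hvals]
  constructor
  · rintro ⟨L, hL, x, hx, y, hy, hxy, hxora⟩
    rcases List.mem_map.mp hL with ⟨k, hk, rfl⟩
    rw [cg_buckets_getD] at hx hy
    rcases List.mem_filter.mp hx with ⟨hxX, hxk⟩
    rcases List.mem_filter.mp hy with ⟨hyX, hyk⟩
    exact ⟨x, hxX, y, hyX, hxy, by
      have h1 := of_decide_eq_true hxk
      have h2 := of_decide_eq_true hyk
      rw [h1, h2], hxora⟩
  · rintro ⟨x, hx, y, hy, hxy, hkey, hxora⟩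
    refine ⟨bk.getD (cgKey permutation x) [], List.mem_map.mpr
      ⟨cgKey permutation x, ?_, rfl⟩, x, ?_, y, ?_, hxy, hxora⟩
    · rw [cg_buckets_keys]
      rw [PySem.Set.mem_ofList]
      exact List.mem_map.mpr ⟨x, hx, rfl⟩
    · rw [cg_buckets_getD]
      exact List.mem_filter.mpr ⟨hx, by simp⟩
    · rw [cg_buckets_getD]
      exact List.mem_filter.mpr ⟨hy, by simp [hkey]⟩

theorem cg_found_nodup (permutation : List Int) (n : Int) :
    ((((PySem.List.pyRange 0 ((2:Int) ^ n.toNat) 1).foldl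
        (fun d x => d.modify (cgKey permutation x) [] (· ++ [x]))
        (PySem.Dict.empty : PySem.Dict Int (List Int))).values).foldl
      (fun s idxs =>
        idxs.foldl
          (fun s x =>
            idxs.foldl
              (fun s y => if x ≠ y then PySem.Set.add s (PySem.Int.bxor x y) else s) s) s)
      PySem.Set.empty).Nodup := by
  refine cg_nodup_foldl _ (fun s idxs hs => ?_) _ _ (by simp [PySem.Set.empty])
  refine cg_nodup_foldl _ (fun s x hs => ?_) _ _ hs
  refine cg_nodup_foldl _ (fun s y hs => ?_) _ _ hs
  by_cases h : x = y
  · simp [h, hs]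
  · simpa [h] using PySem.Set.nodup_add s (PySem.Int.bxor x y) hs

-- any pair condition puts a in [1, 2^n)
theorem cg_condB_mem_range (permutation : List Int) (n a : Int)
    (h : condB permutation n a) :
    a ∈ PySem.List.pyRange 1 ((2:Int) ^ n.toNat) 1 := by
  rcases h with ⟨x, hx, y, hy, hxy, _, hxora⟩
  rw [PySem.List.mem_pyRange_one] at hx hy ⊢
  have hN : ((2:Int) ^ n.toNat) = ((2 ^ n.toNat : Nat) : Int) := by push_cast; ring
  have hxe : PySem.Int.bxor x y = ((x.toNat ^^^ y.toNat : Nat) : Int) :=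
    PySem.Int.bxor_of_nonneg hx.1 hy.1
  have hlt : x.toNat ^^^ y.toNat < 2 ^ n.toNat := Nat.xor_lt_two_pow (by omega) (by omega)
  have hne' : x.toNat ≠ y.toNat := by omega
  have hne : x.toNat ^^^ y.toNat ≠ 0 := fun h0 => hne' (Nat.xor_eq_zero_iff.mp h0)
  omega

-- the conditions agree on every a in A's range
theorem cg_cond_iff (permutation : List Int) (n a : Int)
    (ha : a ∈ PySem.List.pyRange 1 ((2:Int) ^ n.toNat) 1) :
    condA permutation n a ↔ condB permutation n a := by
  rw [PySem.List.mem_pyRange_one] at ha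
  have hN : ((2:Int) ^ n.toNat) = ((2 ^ n.toNat : Nat) : Int) := by push_cast; ring
  constructor
  · rintro ⟨x, hx, hc⟩
    have hxr := (PySem.List.mem_pyRange_one).mp hx
    refine ⟨x, hx, PySem.Int.bxor x a, ?_, ?_, ?_, bxor_cancel_left x a⟩
    · rw [PySem.List.mem_pyRange_one]
      have hxe : PySem.Int.bxor x a = ((x.toNat ^^^ a.toNat : Nat) : Int) :=
        PySem.Int.bxor_of_nonneg (by omega) (by omega)
      have := Nat.xor_lt_two_pow (x := x.toNat) (y := a.toNat) (n := n.toNat)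
        (by omega) (by omega)
      omega
    · intro hxeq
      have h2 := congrArg (PySem.Int.bxor x) hxeq.symm
      rw [bxor_cancel_left, PySem.Int.bxor_self] at h2
      omega
    · -- cgKey x = cgKey (x ^ a), from F(x^a) ^ F(x) = a
      unfold cgKey
      generalize PySem.List.pyGetD permutation (PySem.Int.bxor x a) 0 = v at hc ⊢
      generalize PySem.List.pyGetD permutation x 0 = u at hc ⊢
      rw [← hc]
      simp only [bxor_left_comm, PySem.Int.bxor_comm, bxor_cancel_left]
  · rintro ⟨x, hx, y, hy, hxy, hkey, hxora⟩
    refine ⟨x, hx, ?_⟩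
    have hyx : PySem.Int.bxor x a = y := by
      rw [← hxora, bxor_cancel_left]
    rw [hyx]
    -- from cgKey x = cgKey y: bxor (P y) (P x) = bxor x y = a
    unfold cgKey at hkey
    set u := PySem.List.pyGetD permutation x 0 with hu
    set v := PySem.List.pyGetD permutation y 0 with hv
    have hu' : u = PySem.Int.bxor x (PySem.Int.bxor y v) := by
      have := congrArg (PySem.Int.bxor x) hkey
      rwa [bxor_cancel_left] at this
    rw [hu', ← hxora]
    simp only [bxor_left_comm, PySem.Int.bxor_self, PySem.Int.bxor_zero]

-- both sums count the a in [1, 2^n) with a solution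
theorem cg_sums_agree (permutation : List Int) (n : Int) :
    (PySem.List.pyRange 1 ((2:Int) ^ n.toNat) 1).foldl
      (fun s x => s + gamma permutation n x x) 0 =
    PySem.Set.len
      ((((PySem.List.pyRange 0 ((2:Int) ^ n.toNat) 1).foldl
        (fun d x => d.modify (cgKey permutation x) [] (· ++ [x]))
        (PySem.Dict.empty : PySem.Dict Int (List Int))).values).foldl
      (fun s idxs =>
        idxs.foldl
          (fun s x =>
            idxs.foldl
              (fun s y => if x ≠ y then PySem.Set.add s (PySem.Int.bxor x y) else s) s) s)
      PySem.Set.empty) := by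
  set R := PySem.List.pyRange 1 ((2:Int) ^ n.toNat) 1 with hR
  set found := ((((PySem.List.pyRange 0 ((2:Int) ^ n.toNat) 1).foldl
        (fun d x => d.modify (cgKey permutation x) [] (· ++ [x]))
        (PySem.Dict.empty : PySem.Dict Int (List Int))).values).foldl
      (fun s idxs =>
        idxs.foldl
          (fun s x =>
            idxs.foldl
              (fun s y => if x ≠ y then PySem.Set.add s (PySem.Int.bxor x y) else s) s) s)
      PySem.Set.empty) with hfound
  -- LHS: the 0/1-sum is a countP over R
  have hA : R.foldl (fun s x => s + gamma permutation n x x) 0 =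
      (R.countP (fun a => decide (condA permutation n a)) : Int) := by
    have hstep : ∀ (s a : Int), a ∈ R →
        s + gamma permutation n a a =
        (if condA permutation n a then s + 1 else s) := by
      intro s a ha
      have ha1 : (1:Int) ≤ a := ((PySem.List.mem_pyRange_one).mp ha).1
      have hne : a ≠ 0 := by omega
      rw [gamma, if_neg hne, gammaLoop_eq_exists]
      unfold condA
      split_ifs <;> ring
    rw [PySem.List.foldl_congr_mem _ _ _ _ hstep,
      PySem.List.foldl_ite_add_one (condA permutation n) R 0]
    ring
  -- RHS: found is a permutation of the filtered range
  have hperm : found.Perm (R.filter (fun a => decide (condB permutation n a))) := by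
    rw [List.perm_ext_iff_of_nodup (cg_found_nodup permutation n)
      ((PySem.List.nodup_pyRange_one 1 _).filter _)]
    intro a
    rw [cg_mem_found, List.mem_filter]
    constructor
    · intro h
      exact ⟨cg_condB_mem_range permutation n a h, decide_eq_true h⟩
    · rintro ⟨_, h⟩
      exact of_decide_eq_true h
  have hlen : (PySem.Set.len found : Int) =
      (R.countP (fun a => decide (condB permutation n a)) : Int) := by
    rw [PySem.Set.len, hperm.length_eq, List.countP_eq_length_filter]
  rw [hA, hlen]
  congr 1
  apply List.countP_congr
  intro a ha
  simp [cg_cond_iff permutation n a ha]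

-- ===== VERDICT (by name: the statement is the Claim_ definition above) =====
theorem check_gamma_spec : Claim_equal_check_gamma := by
  intro permutation n _ _
  unfold Spec_check_gamma check_gamma check_gamma_alt
  have h := cg_sums_agree permutation n
  unfold cgKey at h
  rw [h]
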